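-- pv_equiv track=rewrite | github.com/ayoubzulfiqar/Leetcode-Medium | NextGreaterNumericallyBalancedNumber/next_greater_numerically_balanced_number.py | is_numerically_balanced
-- ===== SOURCE A (Python) =====
-- def is_numerically_balanced(num):
--     s_num = str(num)
--     counts = [0] * 10
--
--     for char_digit in s_num:
--         digit = int(char_digit)
--         counts[digit] += 1
--
--     for digit in range(10):
--         if counts[digit] > 0:
--             if counts[digit] != digit:
--                 return False
--         if digit == 0 and counts[0] > 0:
--             return False
--     return True
-- ===== SOURCE B (Python) =====
-- def is_numerically_balanced(num):
--     # Sort the digits; then the string is balanced iff every maximal run of an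
--     # equal digit d has length exactly d (a run of '0' can never have length 0).
--     t = sorted(str(num))
--     i = 0
--     while i < len(t):
--         j = i
--         while j < len(t) and t[j] == t[i]:
--             j += 1
--         if j - i != int(t[i]):
--             return False
--         i = j
--     return True
-- ===== Notes on version B (the rewrite author's own statement) =====
-- stated objective: alternative
-- what changed: Replaces A's fixed-size count-array accumulation plus per-digit validation loop by sort-then-run-scan: sort the characters of str(num) and check that every maximal run of an equal digit d has length exactly d (a zero-digit run can never have length zero). Pre_ excludes negative num, on which A raises ValueError (int('-')).
import Mathlib
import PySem

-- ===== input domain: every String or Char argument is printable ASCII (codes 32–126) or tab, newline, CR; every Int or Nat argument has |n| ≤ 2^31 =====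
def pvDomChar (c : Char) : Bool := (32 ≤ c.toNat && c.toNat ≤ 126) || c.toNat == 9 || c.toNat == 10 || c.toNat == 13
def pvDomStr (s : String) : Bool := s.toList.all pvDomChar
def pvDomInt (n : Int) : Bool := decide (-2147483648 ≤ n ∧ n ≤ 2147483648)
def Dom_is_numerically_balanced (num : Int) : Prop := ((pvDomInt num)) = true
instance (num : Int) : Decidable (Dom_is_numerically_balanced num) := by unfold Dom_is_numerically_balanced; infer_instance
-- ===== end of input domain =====

-- B replaces A's count-array pass + per-digit validation loop by sort-then-run-scan:
-- sort str(num)'s characters and require each maximal run of digit d to have length d.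


-- ===== PORT A =====
-- the first for-loop: build the counts array (int(char) ported as code point − 48,
-- exact for digit characters — Pre_ guarantees str(num) contains only digits)
def pvACounts : List Char → List Int → List Int
  | [], counts => counts
  | c :: rest, counts =>
    let digit : Int := (c.toNat : Int) - 48
    pvACounts rest (counts.set digit.toNat (counts.getD digit.toNat 0 + 1))

-- the second for-loop over range(10), with its two early returns
def pvACheck (counts : List Int) (d : Nat) : Bool :=
  if _h : d < 10 then
    if counts.getD d 0 > 0 ∧ counts.getD d 0 ≠ (d : Int) then false
    else if d = 0 ∧ counts.getD 0 0 > 0 then false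
    else pvACheck counts (d + 1)
  else true
termination_by 10 - d

def is_numerically_balanced (num : Int) : Bool :=
  pvACheck (pvACounts (PySem.Int.toChars num) (List.replicate 10 0)) 0

-- ===== PORT B =====
-- the outer while-loop of Source B: each step consumes one maximal run of equal characters
-- (the inner 'while t[j] == t[i]' loop is the takeWhile/dropWhile split) and checks
-- its length against int(t[i]) (ported as code point − 48, exact for digit characters)
def pvBScan : List Char → Bool
  | [] => true
  | c :: rest =>
    if ((rest.takeWhile (fun x => x == c)).length + 1 : Int) ≠ ((c.toNat : Int) - 48) then false
    else pvBScan (rest.dropWhile (fun x => x == c))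
termination_by l => l.length
decreasing_by simp; exact List.length_dropWhile_le _ _

def is_numerically_balanced_alt (num : Int) : Bool :=
  pvBScan (PySem.List.sorted (PySem.Int.toChars num) (fun c => c) false)

-- ===== PRECONDITION & SPEC =====
-- Pre_ excludes negative num, on which A raises ValueError (int('-') on the sign character).
def Pre_is_numerically_balanced (num : Int) : Prop := 0 ≤ num
instance (num : Int) : Decidable (Pre_is_numerically_balanced num) := by unfold Pre_is_numerically_balanced; infer_instance
def pvWitness_is_numerically_balanced : Int := (1203)

def Spec_is_numerically_balanced (num : Int) (out : Bool) : Prop := out = is_numerically_balanced_alt num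
instance (num : Int) (out : Bool) : Decidable (Spec_is_numerically_balanced num out) := by unfold Spec_is_numerically_balanced; infer_instance

-- ===== CLAIM (what is proved, stated in full; the proofs are below) =====
def Claim_equal_is_numerically_balanced : Prop := ∀ (num : Int), Dom_is_numerically_balanced num → Pre_is_numerically_balanced num → Spec_is_numerically_balanced num (is_numerically_balanced num)

-- ===== LEMMAS AND PROOFS =====

-- the balance condition both ports are equivalent to
def pvBal (l : List Char) : Prop := ∀ c ∈ l, ((c.toNat : Int) - 48) = (l.count c : Int)

-- digit characters: bounds on the code point
theorem pv_digit_bounds (c : Char) (h : c.isDigit = true) : 48 ≤ c.toNat ∧ c.toNat ≤ 57 := by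
  simp [Char.isDigit] at h
  exact h

theorem pv_digit_inj (c d : Char) (h : c.toNat = d.toNat) : c = d := by
  rw [← Char.ofNat_toNat c, ← Char.ofNat_toNat d, h]

-- str(num) for 0 ≤ num consists of digit characters
theorem pv_toChars_digits (num : Int) (h : 0 ≤ num) :
    ∀ c ∈ PySem.Int.toChars num, c.isDigit = true := by
  intro c hc
  unfold PySem.Int.toChars at hc
  rw [if_neg (by omega)] at hc
  exact Nat.isDigit_of_mem_toDigits (by norm_num) (by norm_num) hc

-- invariant of A's counting loop
theorem pv_counts_spec (l : List Char) (counts : List Int)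
    (hl : ∀ c ∈ l, c.isDigit = true) (hlen : counts.length = 10) (d : Nat) (hd : d < 10) :
    (pvACounts l counts).getD d 0
      = counts.getD d 0 + (l.countP (fun c => c.toNat - 48 == d) : Int) := by
  induction l generalizing counts with
  | nil => simp [pvACounts]
  | cons c rest ih =>
    have hcdig := hl c (by simp)
    obtain ⟨h48, h57⟩ := pv_digit_bounds c hcdig
    have hset : (counts.set (((c.toNat : Int) - 48)).toNat ((counts.getD (((c.toNat : Int) - 48)).toNat 0) + 1)).length = 10 := by
      simpa using hlen
    rw [pvACounts]
    rw [ih _ (fun x hx => hl x (by simp [hx])) hset]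
    rw [List.countP_cons]
    have hidx : (((c.toNat : Int) - 48)).toNat = c.toNat - 48 := by omega
    by_cases he : c.toNat - 48 = d
    · rw [if_pos (by simp [he])]
      simp only [List.getD, hidx, he]
      rw [List.getElem?_set]
      simp [hlen, hd]
      ring
    · rw [if_neg (by simp [he])]
      simp only [List.getD, hidx]
      rw [List.getElem?_set, if_neg he]
      push_cast
      ring

-- characterisation of A's validation loop
theorem pv_check_iff (counts : List Int) (d : Nat) :
    pvACheck counts d = true ↔
      ∀ j, d ≤ j → j < 10 →
        ((0 < counts.getD j 0 → counts.getD j 0 = (j : Int)) ∧ (j = 0 → ¬ 0 < counts.getD 0 0)) := by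
  rw [pvACheck]
  by_cases h : d < 10
  · rw [dif_pos h]
    by_cases h1 : counts.getD d 0 > 0 ∧ counts.getD d 0 ≠ (d : Int)
    · rw [if_pos h1]
      constructor
      · intro hf; exact absurd hf (by simp)
      · intro hall; exact absurd ((hall d le_rfl h).1 h1.1) h1.2
    · rw [if_neg h1]
      by_cases h2 : d = 0 ∧ counts.getD 0 0 > 0
      · rw [if_pos h2]
        constructor
        · intro hf; exact absurd hf (by simp)
        · intro hall; exact absurd h2.2 ((hall d le_rfl h).2 h2.1)
      · rw [if_neg h2]
        rw [pv_check_iff counts (d + 1)]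
        constructor
        · intro hrec j hdj hj10
          rcases Nat.eq_or_lt_of_le hdj with heq | hlt
          · subst heq
            push Not at h1 h2
            constructor
            · intro hpos; exact h1 hpos
            · intro hj0 hpos; exact absurd hpos (by simpa [hj0] using (h2 hj0))
          · exact hrec j hlt hj10
        · intro hall j hdj hj10
          exact hall j (Nat.le_of_succ_le hdj) hj10
  · rw [dif_neg h]
    constructor
    · intro _ j hdj hj10
      omega
    · intro _; rfl
  termination_by 10 - d

-- A's verdict on a list of digit characters equals the balance condition
theorem pv_main_A (l : List Char) (hl : ∀ c ∈ l, c.isDigit = true) :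
    (pvACheck (pvACounts l (List.replicate 10 0)) 0 = true) ↔ pvBal l := by
  rw [pv_check_iff]
  have hcnt : ∀ d : Nat, d < 10 →
      (pvACounts l (List.replicate 10 0)).getD d 0 = (l.countP (fun c => c.toNat - 48 == d) : Int) := by
    intro d hd
    rw [pv_counts_spec l _ hl (by simp) d hd]
    simp only [List.getD, List.getElem?_replicate]
    split_ifs <;> simp
  have hcount_eq : ∀ c ∈ l, l.countP (fun c' => c'.toNat - 48 == (c.toNat - 48)) = l.count c := by
    intro c hc
    have hcdig := hl c hc
    rw [List.count]
    apply List.countP_congr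
    intro x hx
    have hxdig := hl x hx
    obtain ⟨hx48, _⟩ := pv_digit_bounds x hxdig
    obtain ⟨hc48, _⟩ := pv_digit_bounds c hcdig
    simp only [beq_iff_eq]
    constructor
    · intro h; exact pv_digit_inj x c (by omega)
    · intro h; subst h; rfl
  constructor
  · intro hA c hcmem
    have hcdig := hl c hcmem
    obtain ⟨hc48, hc57⟩ := pv_digit_bounds c hcdig
    set d : Nat := c.toNat - 48 with hdv
    have hd10 : d < 10 := by omega
    have hpos : 0 < l.count c := List.count_pos_iff.mpr hcmem
    have hcd : (pvACounts l (List.replicate 10 0)).getD d 0 = (l.count c : Int) := by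
      rw [hcnt d hd10, hcount_eq c hcmem]
    have hApos := (hA d (Nat.zero_le d) hd10).1 (by rw [hcd]; exact_mod_cast hpos)
    rw [hcd] at hApos
    omega
  · intro hB j hj0 hj10
    constructor
    · intro hpos
      rw [hcnt j hj10] at hpos ⊢
      have hex : 0 < l.countP (fun c => c.toNat - 48 == j) := by exact_mod_cast hpos
      obtain ⟨c, hcmem, hcp⟩ := List.countP_pos_iff.mp hex
      simp only [beq_iff_eq] at hcp
      have hcdig := hl c hcmem
      obtain ⟨hc48, _⟩ := pv_digit_bounds c hcdig
      have hBc := hB c hcmem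
      have : l.countP (fun c' => c'.toNat - 48 == j) = l.count c := by
        rw [← hcp]; exact hcount_eq c hcmem
      rw [this, ← hBc]
      omega
    · intro hj00 hpos
      rw [hcnt 0 (by norm_num)] at hpos
      have hex : 0 < l.countP (fun c => c.toNat - 48 == 0) := by exact_mod_cast hpos
      obtain ⟨c, hcmem, hcp⟩ := List.countP_pos_iff.mp hex
      simp only [beq_iff_eq] at hcp
      have hcdig := hl c hcmem
      obtain ⟨hc48, _⟩ := pv_digit_bounds c hcdig
      have hBc := hB c hcmem
      have hcpos : 0 < l.count c := List.count_pos_iff.mpr hcmem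
      omega

-- on a sorted (≤-pairwise) list, the head does not occur past its run
theorem pv_not_mem_dropWhile (c : Char) (rest : List Char)
    (hs : (c :: rest).Pairwise (· ≤ ·)) :
    c ∉ rest.dropWhile (fun x => x == c) := by
  induction rest with
  | nil => simp
  | cons x xs ih =>
    rw [List.dropWhile_cons]
    by_cases hx : x = c
    · rw [if_pos (by simp [hx])]
      apply ih
      rcases List.pairwise_cons.mp hs with ⟨h1, h2⟩
      rcases List.pairwise_cons.mp h2 with ⟨_, h4⟩
      exact List.pairwise_cons.mpr ⟨fun y hy => h1 y (by simp [hy]), h4⟩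
    · rw [if_neg (by simp [hx])]
      intro hmem
      rcases List.pairwise_cons.mp hs with ⟨h1, h2⟩
      rcases List.pairwise_cons.mp h2 with ⟨h3, _⟩
      have hcx : c ≤ x := h1 x (by simp)
      rcases List.mem_cons.mp hmem with he | hxs
      · exact hx he.symm
      · have := h3 c hxs
        exact hx (le_antisymm this hcx)

-- B's run scan on a sorted list equals the balance condition
theorem pv_main_B (n : Nat) : ∀ l : List Char, l.length ≤ n → l.Pairwise (· ≤ ·) →
    ((pvBScan l = true) ↔ pvBal l) := by
  induction n with
  | zero =>
    intro l hlen _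
    have : l = [] := List.eq_nil_of_length_eq_zero (Nat.le_zero.mp hlen)
    subst this
    rw [pvBScan.eq_def]
    simp [pvBal]
  | succ n ih =>
    intro l hlen hs
    match l with
    | [] => rw [pvBScan.eq_def]; simp [pvBal]
    | c :: rest =>
      have hsplit : rest.takeWhile (fun x => x == c) ++ rest.dropWhile (fun x => x == c) = rest :=
        List.takeWhile_append_dropWhile
      have htw : ∀ x ∈ rest.takeWhile (fun x => x == c), x = c := by
        intro x hx
        simpa using List.mem_takeWhile_imp hx
      have hnc : c ∉ rest.dropWhile (fun x => x == c) := pv_not_mem_dropWhile c rest hs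
      have hsdrop : (rest.dropWhile (fun x => x == c)).Pairwise (· ≤ ·) :=
        ((List.pairwise_cons.mp hs).2).sublist (List.dropWhile_sublist _)
      have hlend : (rest.dropWhile (fun x => x == c)).length ≤ n := by
        have := List.length_dropWhile_le (fun x => x == c) rest
        simp at hlen
        omega
      have ihd := ih _ hlend hsdrop
      -- counts
      have hcountT : (rest.takeWhile (fun x => x == c)).count c
          = (rest.takeWhile (fun x => x == c)).length := by
        rw [List.count_eq_length]
        intro b hb
        exact (htw b hb).symm
      have hcountD : (rest.dropWhile (fun x => x == c)).count c = 0 :=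
        List.count_eq_zero.mpr hnc
      have hrc : rest.count c
          = (rest.takeWhile (fun x => x == c)).count c + (rest.dropWhile (fun x => x == c)).count c := by
        conv_lhs => rw [← hsplit]
        rw [List.count_append]
      have hcount_c : (c :: rest).count c
          = (rest.takeWhile (fun x => x == c)).length + 1 := by
        rw [List.count_cons_self, hrc, hcountT, hcountD]
      have hcount_x : ∀ x, x ≠ c →
          (c :: rest).count x = (rest.dropWhile (fun x => x == c)).count x := by
        intro x hx
        have hrx : rest.count x
            = (rest.takeWhile (fun x => x == c)).count x + (rest.dropWhile (fun x => x == c)).count x := by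
          conv_lhs => rw [← hsplit]
          rw [List.count_append]
        have hTx : (rest.takeWhile (fun x => x == c)).count x = 0 := by
          rw [List.count_eq_zero]
          intro hmem
          exact hx (htw x hmem)
        have hhead : (c :: rest).count x = rest.count x := by
          rw [List.count_cons]
          simp [Ne.symm hx]
        omega
      have hmem_iff : ∀ x, x ∈ c :: rest ↔ x = c ∨ x ∈ rest.dropWhile (fun x => x == c) := by
        intro x
        constructor
        · intro hx
          by_cases hxc : x = c
          · exact Or.inl hxc
          · rcases List.mem_cons.mp hx with h | h
            · exact absurd h hxc
            · rw [← hsplit] at h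
              rcases List.mem_append.mp h with h | h
              · exact absurd (htw x h) hxc
              · exact Or.inr h
        · intro hx
          rcases hx with h | h
          · simp [h]
          · have : x ∈ rest := (List.dropWhile_sublist _).mem h
            simp [this]
      rw [pvBScan.eq_def]
      simp only
      by_cases hcond : (((rest.takeWhile (fun x => x == c)).length + 1 : Int) ≠ ((c.toNat : Int) - 48))
      · rw [if_pos hcond]
        constructor
        · intro hf; exact absurd hf (by simp)
        · intro hbal
          have := hbal c (by simp)
          rw [hcount_c] at this
          exact absurd (by push_cast at this ⊢; omega) hcond
      · rw [if_neg hcond]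
        push Not at hcond
        rw [ihd]
        constructor
        · intro hbalD x hx
          rcases (hmem_iff x).mp hx with h | h
          · subst h
            rw [hcount_c]
            push_cast
            omega
          · have hxc : x ≠ c := fun he => hnc (he ▸ h)
            rw [hcount_x x hxc]
            exact hbalD x h
        · intro hbal x hx
          have hxc : x ≠ c := fun he => hnc (he ▸ hx)
          rw [← hcount_x x hxc]
          exact hbal x ((hmem_iff x).mpr (Or.inr hx))

-- ===== VERDICT (by name: the statement is the Claim_ definition above) =====
theorem is_numerically_balanced_spec : Claim_equal_is_numerically_balanced := by
  intro num _hdom hpre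
  unfold Spec_is_numerically_balanced is_numerically_balanced is_numerically_balanced_alt
  set l := PySem.Int.toChars num with hl
  set s := PySem.List.sorted l (fun c => c) false with hsdef
  have hperm : s.Perm l := PySem.List.sorted_perm l (fun c => c) false
  have hdig : ∀ c ∈ l, c.isDigit = true := pv_toChars_digits num hpre
  have hsorted : s.Pairwise (· ≤ ·) := by
    have := PySem.List.sorted_pairwise l (fun c => c)
    simpa using this
  have hbal_iff : pvBal l ↔ pvBal s := by
    unfold pvBal
    constructor
    · intro h c hc
      rw [hperm.count_eq]
      exact h c (hperm.mem_iff.mp hc)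
    · intro h c hc
      rw [← hperm.count_eq]
      exact h c (hperm.mem_iff.mpr hc)
  rw [Bool.eq_iff_iff, pv_main_A l hdig, pv_main_B s.length s le_rfl hsorted]
  exact hbal_iff
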